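-- pv_equiv track=rewrite | github.com/pypi-data/pypi-mirror-377 | packages/web-research-agent/web_research_agent-1.1.12.tar.gz/web_research_agent-1.1.12/utils/criteria_filter.py | filter_results_by_criteria
-- ===== SOURCE A (Python) =====
-- from typing import List, Dict, Any
--
-- def filter_results_by_criteria(results: List[Dict[str, Any]], criteria: List[str]) -> List[Dict[str, Any]]:
--     """
--     Filter results to only those matching all criteria.
--
--     Args:
--         results: List of result objects
--         criteria: List of criteria strings
--
--     Returns:
--         List of results matching all criteria
--     """
--     # Implementation depends on the structure of your results
--     # This is a simplified example
--     matching_results = []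
--
--     for result in results:
--         matches_all = True
--         for criterion in criteria:
--             # Convert criterion to lowercase keywords for fuzzy matching
--             keywords = [k.strip() for k in criterion.lower().split() if len(k.strip()) > 3]
--
--             # Check if result content contains all keywords from this criterion
--             content = str(result.get('content', '')).lower()
--             if not all(keyword in content for keyword in keywords):
--                 matches_all = False
--                 break
--
--         if matches_all:
--             matching_results.append(result)
--
--     return matching_results
-- ===== SOURCE B (Python) =====
-- def filter_results_by_criteria(results, criteria):
--     # Staged refinement: pair each result with its lowered content once, then
--     # for each keyword (keyword-outer loop) filter the surviving pairs; the
--     # result order is preserved because each stage is an order-preserving filter.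
--     survivors = [(result, str(result.get('content', '')).lower()) for result in results]
--     for criterion in criteria:
--         for k in criterion.lower().split():
--             kw = k.strip()
--             if len(kw) > 3:
--                 survivors = [rc for rc in survivors if kw in rc[1]]
--     return [result for result, _ in survivors]
-- ===== Notes on version B (the rewrite author's own statement) =====
-- stated objective: alternative
-- what changed: B inverts the loop nesting: instead of testing each result against every criterion's keywords (result-outer with early break), it caches each result's lowered content once and iterates keywords on the outside, each keyword filtering the surviving (result, content) pairs in an order-preserving sieve; correct because AND over keywords commutes with composed filters.
import Mathlib
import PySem

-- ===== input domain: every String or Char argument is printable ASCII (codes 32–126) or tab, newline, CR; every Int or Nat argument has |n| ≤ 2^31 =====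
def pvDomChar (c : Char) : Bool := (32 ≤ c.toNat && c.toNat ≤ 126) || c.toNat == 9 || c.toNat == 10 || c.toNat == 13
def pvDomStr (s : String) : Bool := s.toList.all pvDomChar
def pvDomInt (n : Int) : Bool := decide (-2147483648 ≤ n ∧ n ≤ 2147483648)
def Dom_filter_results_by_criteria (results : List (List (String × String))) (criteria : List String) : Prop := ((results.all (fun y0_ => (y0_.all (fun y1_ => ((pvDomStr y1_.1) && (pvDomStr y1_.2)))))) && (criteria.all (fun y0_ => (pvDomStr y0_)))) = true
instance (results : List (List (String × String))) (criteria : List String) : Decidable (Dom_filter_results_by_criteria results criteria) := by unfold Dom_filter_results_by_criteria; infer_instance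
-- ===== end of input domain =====

-- B inverts the loop nesting: it caches each result's lowered content once, then each
-- keyword (outer loop) filters the surviving (result, content) pairs; same output order.

-- ===== PORT A =====
-- "str(result.get('content', '')).lower()"; values are strings so str() is the identity;
-- dict lookup = first match in the association list (shared by both Pythons verbatim)
def pvContent (result : List (String × String)) : String :=
  PySem.Str.lower ((result.lookup "content").getD "")

-- A's '[k.strip() for k in criterion.lower().split() if len(k.strip()) > 3]'
def pvKeywordsA (criterion : String) : List String :=
  ((PySem.Str.split₀ (PySem.Str.lower criterion)).filter
      (fun k => 3 < PySem.Str.len (PySem.Str.strip k))).map PySem.Str.strip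

-- A's inner 'for criterion in criteria: …' with its early break
def pvMatchesAll (result : List (String × String)) : List String → Bool
  | [] => true
  | criterion :: rest =>
    let keywords := pvKeywordsA criterion
    let content := pvContent result
    if !(keywords.all (fun keyword => PySem.Str.isIn keyword content)) then false
    else pvMatchesAll result rest

def filter_results_by_criteria (results : List (List (String × String))) (criteria : List String) : List (List (String × String)) :=
  results.foldl (fun acc result =>
    if pvMatchesAll result criteria then acc ++ [result] else acc) []

-- ===== PORT B =====
-- B's inner 'for k in criterion.lower().split(): kw = k.strip(); if len(kw) > 3: filter'
def pvSieveCriterion (criterion : String) (s : List (List (String × String) × String)) :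
    List (List (String × String) × String) :=
  (PySem.Str.split₀ (PySem.Str.lower criterion)).foldl (fun survivors k =>
    let kw := PySem.Str.strip k
    if 3 < PySem.Str.len kw then survivors.filter (fun rc => PySem.Str.isIn kw rc.2)
    else survivors) s

def filter_results_by_criteria_alt (results : List (List (String × String))) (criteria : List String) : List (List (String × String)) :=
  let survivors := results.map (fun result => (result, pvContent result))
  (criteria.foldl (fun s criterion => pvSieveCriterion criterion s) survivors).map Prod.fst

-- ===== PRECONDITION & SPEC =====
def Spec_filter_results_by_criteria (results : List (List (String × String))) (criteria : List String) (out : List (List (String × String))) : Prop := out = filter_results_by_criteria_alt results criteria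
instance (results : List (List (String × String))) (criteria : List String) (out : List (List (String × String))) : Decidable (Spec_filter_results_by_criteria results criteria out) := by unfold Spec_filter_results_by_criteria; infer_instance

-- ===== CLAIM =====
def Claim_equal_filter_results_by_criteria : Prop := ∀ (results : List (List (String × String))) (criteria : List String), Dom_filter_results_by_criteria results criteria → Spec_filter_results_by_criteria results criteria (filter_results_by_criteria results criteria)

-- ===== LEMMAS AND PROOFS =====
-- one criterion's sieve = filter by that criterion's keyword conjunction
lemma pvSieveCriterion_eq_filter (criterion : String)
    (s : List (List (String × String) × String)) :
    pvSieveCriterion criterion s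
      = s.filter (fun rc => (pvKeywordsA criterion).all (fun kw => PySem.Str.isIn kw rc.2)) := by
  unfold pvSieveCriterion pvKeywordsA
  generalize PySem.Str.split₀ (PySem.Str.lower criterion) = ks
  induction ks generalizing s with
  | nil => simp
  | cons k rest ih =>
    simp only [List.foldl_cons, List.filter_cons]
    by_cases h : 3 < PySem.Str.len (PySem.Str.strip k)
    · simp only [h, if_pos, decide_true, ih, List.filter_filter]
      congr 1
      funext rc
      simp [Bool.and_comm]
    · simp only [h, if_neg, not_false_iff, decide_false, ih]
      simp

-- folding the sieves = filter by pvMatchesAll (on content-paired lists)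
lemma sieve_fold_eq_filter (criteria : List String)
    (s : List (List (String × String) × String))
    (hs : ∀ rc ∈ s, rc.2 = pvContent rc.1) :
    criteria.foldl (fun t c => pvSieveCriterion c t) s
      = s.filter (fun rc => pvMatchesAll rc.1 criteria) := by
  induction criteria generalizing s with
  | nil => simp [pvMatchesAll]
  | cons c rest ih =>
    rw [List.foldl_cons, pvSieveCriterion_eq_filter,
        ih _ (fun rc h => hs rc (List.mem_of_mem_filter h)), List.filter_filter]
    refine List.filter_congr (fun rc hmem => ?_)
    have hc := hs rc hmem
    simp only [pvMatchesAll, ← hc]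
    cases hb : (pvKeywordsA c).all (fun kw => PySem.Str.isIn kw rc.2) <;> simp

-- ===== VERDICT =====
theorem filter_results_by_criteria_spec : Claim_equal_filter_results_by_criteria := by
  intro results criteria _
  unfold Spec_filter_results_by_criteria filter_results_by_criteria
  simp only [filter_results_by_criteria_alt]
  rw [PySem.List.foldl_append_if_eq_filter]
  rw [sieve_fold_eq_filter _ _ (by simp)]
  rw [List.filter_map]; simp [Function.comp_def]
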